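-- pv_equiv track=rewrite | github.com/luke-ck/sentiment-analysis | src/data_leakage.py | last_unmatched_opening_pos
-- ===== SOURCE A (Python) =====
-- def last_unmatched_opening_pos(tweet: str) -> int:
--     closing = 0
--
--     for i, c in reversed(list(enumerate(tweet))):
--         if c == ")":
--             closing += 1
--         if c == "(":
--             if closing == 0:
--                 return i
--             else:
--                 closing -= 1
-- ===== SOURCE B (Python) =====
-- def last_unmatched_opening_pos(tweet: str) -> int:
--     stack = []
--     for i, c in enumerate(tweet):
--         if c == "(":
--             stack.append(i)
--         elif c == ")":
--             if stack:
--                 stack.pop()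
--     if stack:
--         return stack[-1]
-- ===== Notes on version B (the rewrite author's own statement) =====
-- stated objective: alternative
-- what changed: Replaces the reverse scan with a closing-parenthesis counter by a forward scan maintaining a stack of opening-parenthesis indices (returning the top at the end), which also avoids materializing and reversing list(enumerate(tweet)).
import Mathlib
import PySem

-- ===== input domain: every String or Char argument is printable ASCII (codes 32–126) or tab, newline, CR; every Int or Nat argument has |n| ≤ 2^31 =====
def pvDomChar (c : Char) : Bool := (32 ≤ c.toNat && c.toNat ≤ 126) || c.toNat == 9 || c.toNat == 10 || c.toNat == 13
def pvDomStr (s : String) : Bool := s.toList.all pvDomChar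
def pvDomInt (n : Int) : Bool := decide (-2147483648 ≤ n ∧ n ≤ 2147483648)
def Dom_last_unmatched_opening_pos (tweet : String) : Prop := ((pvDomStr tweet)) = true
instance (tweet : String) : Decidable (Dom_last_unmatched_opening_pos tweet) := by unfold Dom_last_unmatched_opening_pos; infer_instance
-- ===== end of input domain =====

-- B replaces A's reverse scan with a closing-counter by a forward scan keeping a stack of
-- opening-parenthesis indices (alternative decomposition, same O(n) cost).

-- ===== PORT A =====
-- A's for-loop over reversed(list(enumerate(tweet))) with the `closing` counter; falls off → none.
def pvALoop : List (Int × Char) → Int → Option Int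
  | [], _ => none
  | (i, c) :: rest, closing =>
    let closing := if c = ')' then closing + 1 else closing
    if c = '(' then
      if closing = 0 then some i else pvALoop rest (closing - 1)
    else pvALoop rest closing

def last_unmatched_opening_pos (tweet : String) : Option Int :=
  pvALoop (PySem.List.enumerate tweet.toList 0).reverse 0

-- ===== PORT B =====
-- B's forward loop: push index on '(', pop (if non-empty) on ')'; stack top at the head.
def pvBStep (stack : List Int) (p : Int × Char) : List Int :=
  if p.2 = '(' then p.1 :: stack
  else if p.2 = ')' then stack.drop 1
  else stack

def last_unmatched_opening_pos_alt (tweet : String) : Option Int :=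
  ((PySem.List.enumerate tweet.toList 0).foldl pvBStep []).head?

-- ===== PRECONDITION & SPEC =====
def Spec_last_unmatched_opening_pos (tweet : String) (out : Option Int) : Prop := out = last_unmatched_opening_pos_alt tweet
instance (tweet : String) (out : Option Int) : Decidable (Spec_last_unmatched_opening_pos tweet out) := by unfold Spec_last_unmatched_opening_pos; infer_instance

-- ===== CLAIM (what is proved, stated in full; the proofs are below) =====
def Claim_equal_last_unmatched_opening_pos : Prop := ∀ (tweet : String), Dom_last_unmatched_opening_pos tweet → Spec_last_unmatched_opening_pos tweet (last_unmatched_opening_pos tweet)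

-- ===== LEMMAS AND PROOFS =====

-- Invariant: A's reverse scan with counter n answers the (n+1)-th element (from the top)
-- of B's forward stack.
theorem pvALoop_reverse_eq (ps : List (Int × Char)) :
    ∀ (n : Int), 0 ≤ n →
      pvALoop ps.reverse n = ((ps.foldl pvBStep []).drop n.toNat).head? := by
  induction ps using List.reverseRecOn with
  | nil => intro n hn; simp [pvALoop]
  | append_singleton ps p ih =>
    intro n hn
    obtain ⟨i, c⟩ := p
    rw [List.reverse_append, List.foldl_append]
    simp only [List.reverse_singleton, List.singleton_append, List.foldl_cons, List.foldl_nil]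
    have hlit : ¬ (('(' : Char) = ')') := by decide
    have hlit2 : ¬ ((')' : Char) = '(') := by decide
    by_cases hopen : c = '('
    · simp only [pvALoop, pvBStep, hopen, if_true, if_neg hlit]
      by_cases h0 : n = 0
      · simp [h0]
      · rw [if_neg h0, ih (n - 1) (by omega)]
        have h2 : n.toNat = (n - 1).toNat + 1 := by omega
        rw [h2, List.drop_succ_cons]
    · by_cases hclose : c = ')'
      · simp only [pvALoop, pvBStep, hclose, if_neg hlit2, if_true]
        rw [ih (n + 1) (by omega), List.drop_drop]
        have h2 : (n + 1).toNat = n.toNat + 1 := by omega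
        simp [h2, Nat.add_comm]
      · simp only [pvALoop, pvBStep, if_neg hclose, if_neg hopen]
        exact ih n hn

-- ===== VERDICT (by name: the statement is the Claim_ definition above) =====
theorem last_unmatched_opening_pos_spec : Claim_equal_last_unmatched_opening_pos := by
  intro tweet _
  unfold Spec_last_unmatched_opening_pos last_unmatched_opening_pos last_unmatched_opening_pos_alt
  simpa using pvALoop_reverse_eq (PySem.List.enumerate tweet.toList 0) 0 le_rfl
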